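-- pv_equiv track=rewrite | github.com/Mruzik1/Migration-Test | tree.py | parse_tree_to_files_array
-- ===== SOURCE A (Python) =====
-- def parse_tree_to_files_array(tree_string):
--     lines = tree_string.strip().split("\n")
--     files_array = []
--     current_path = []
--
--     for line in lines:
--         if not line.strip():
--             continue  # Skip empty lines
--
--         # Calculate the indentation level: assuming each level of indentation is 3 spaces
--         indentation_level = (len(line) - len(line.lstrip())) // 3
--
--         # Update the current_path to reflect the current indentation level
--         current_path = current_path[:indentation_level]
--         item = line.strip()
--
--         # If the item is a file (has a '.'), add its full path to the files_array
--         if "." in item: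
--             full_path = "/".join(current_path + [item])
--             files_array.append(full_path)
--         else:
--             # Update the current path for directories
--             current_path.append(item)
--
--     return files_array
-- ===== SOURCE B (Python) =====
-- def parse_tree_to_files_array(tree_string):
--     # Recursive-descent over (depth, item) entries instead of a mutable truncating stack.
--     entries = []
--     for line in tree_string.strip().split("\n"):
--         item = line.strip()
--         if item:
--             entries.append(((len(line) - len(line.lstrip())) // 3, item))
--
--     def walk(entries, prefix):
--         # consume entries at depth >= len(prefix); return (emitted paths, remaining entries)
--         if not entries:
--             return [], []
--         (depth, item), rest = entries[0], entries[1:]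
--         if depth < len(prefix):
--             return [], entries
--         if "." in item:
--             out, rem = walk(rest, prefix)
--             return ["/".join(prefix + [item])] + out, rem
--         inner, rem = walk(rest, prefix + [item])
--         later, rem2 = walk(rem, prefix)
--         return inner + later, rem2
--
--     return walk(entries, [])[0]
-- ===== Notes on version B (the rewrite author's own statement) =====
-- stated objective: alternative
-- what changed: Replaces A's single loop that mutates a truncating current_path stack with a recursive-descent parser: lines are first preprocessed into (depth, item) entries, then a recursive walk(entries, prefix) consumes entries at depth >= len(prefix), recursing for directories and returning to the caller at a shallower line.
import Mathlib
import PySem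

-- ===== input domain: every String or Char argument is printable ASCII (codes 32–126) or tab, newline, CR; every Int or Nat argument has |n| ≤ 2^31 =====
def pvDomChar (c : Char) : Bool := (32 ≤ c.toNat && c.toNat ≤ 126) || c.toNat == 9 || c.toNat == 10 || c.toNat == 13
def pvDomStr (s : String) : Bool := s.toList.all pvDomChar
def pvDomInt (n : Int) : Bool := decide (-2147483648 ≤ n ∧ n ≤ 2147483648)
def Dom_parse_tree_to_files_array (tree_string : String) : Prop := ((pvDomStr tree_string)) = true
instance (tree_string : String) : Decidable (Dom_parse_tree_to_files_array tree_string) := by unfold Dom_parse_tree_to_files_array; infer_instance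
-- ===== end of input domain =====

-- B replaces A's mutable truncating path stack by a recursive-descent parser over
-- precomputed (depth, item) entries (objective: alternative decomposition, same cost).

-- ===== PORT A =====
-- A's loop: state = (files_array, current_path); path truncated to the line's indentation level.
def parse_tree_to_files_array (tree_string : String) : List String :=
  let lines := (PySem.Str.split? (PySem.Str.strip tree_string) "\n").getD []
  (lines.foldl (fun (st : List String × List String) line =>
    if PySem.Str.strip line = "" then st
    else
      let indentation_level :=
        PySem.Int.floordiv (PySem.Str.len line - PySem.Str.len (PySem.Str.lstrip line)) 3
      let current_path := PySem.List.slice st.2 none (some indentation_level)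
      let item := PySem.Str.strip line
      if PySem.Str.isIn "." item then
        (st.1 ++ [PySem.Str.join "/" (current_path ++ [item])], current_path)
      else
        (st.1, current_path ++ [item])) ([], [])).1

-- ===== PORT B =====
-- B's preprocessing: non-empty lines as (depth, stripped item) entries.
def pvEntries (tree_string : String) : List (Int × String) :=
  ((PySem.Str.split? (PySem.Str.strip tree_string) "\n").getD []).foldl
    (fun acc line =>
      let item := PySem.Str.strip line
      if item = "" then acc
      else acc ++ [(PySem.Int.floordiv (PySem.Str.len line - PySem.Str.len (PySem.Str.lstrip line)) 3,
                    item)]) []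

-- B's recursive descent: consume entries at depth ≥ len(prefix); return (emitted paths, remaining
-- entries).  fuel = number of entries makes the recursion structural (never exhausted in use).
def pvWalk : Nat → List (Int × String) → List String → List String × List (Int × String)
  | 0, es, _ => ([], es)
  | _ + 1, [], _ => ([], [])
  | fuel + 1, (depth, item) :: rest, pfx =>
    if depth < (pfx.length : Int) then ([], (depth, item) :: rest)
    else if PySem.Str.isIn "." item then
      let (out, rem) := pvWalk fuel rest pfx
      (PySem.Str.join "/" (pfx ++ [item]) :: out, rem)
    else
      let (inner, rem) := pvWalk fuel rest (pfx ++ [item])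
      let (later, rem2) := pvWalk fuel rem pfx
      (inner ++ later, rem2)

def parse_tree_to_files_array_alt (tree_string : String) : List String :=
  let entries := pvEntries tree_string
  (pvWalk entries.length entries []).1

-- ===== PRECONDITION & SPEC =====
def Spec_parse_tree_to_files_array (tree_string : String) (out : List String) : Prop := out = parse_tree_to_files_array_alt tree_string
instance (tree_string : String) (out : List String) : Decidable (Spec_parse_tree_to_files_array tree_string out) := by unfold Spec_parse_tree_to_files_array; infer_instance

-- ===== CLAIM (what is proved, stated in full; the proofs are below) =====
def Claim_equal_parse_tree_to_files_array : Prop := ∀ (tree_string : String), Dom_parse_tree_to_files_array tree_string → Spec_parse_tree_to_files_array tree_string (parse_tree_to_files_array tree_string)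

-- ===== LEMMAS AND PROOFS =====

-- The depth of a line, as A and B both compute it.
def pvDepth (line : String) : Int :=
  PySem.Int.floordiv (PySem.Str.len line - PySem.Str.len (PySem.Str.lstrip line)) 3

lemma pvDepth_nonneg (line : String) : 0 ≤ pvDepth line := by
  apply PySem.Int.floordiv_nonneg _ (by norm_num)
  have h : (PySem.Chars.lstrip line.toList).length ≤ line.toList.length :=
    List.length_dropWhile_le _ _
  simp only [PySem.Str.len_eq, PySem.Str.toList_lstrip]
  omega

-- A's loop, re-expressed as a recursion over raw lines (path as the second argument).
def pvFA : List String → List String → List String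
  | [], _ => []
  | line :: rest, path =>
    if PySem.Str.strip line = "" then pvFA rest path
    else
      let path' := PySem.List.slice path none (some (pvDepth line))
      let item := PySem.Str.strip line
      if PySem.Str.isIn "." item then
        PySem.Str.join "/" (path' ++ [item]) :: pvFA rest path'
      else pvFA rest (path' ++ [item])

lemma foldl_eq_pvFA (lines : List String) (files path : List String) :
    (lines.foldl (fun (st : List String × List String) line =>
      if PySem.Str.strip line = "" then st
      else
        let indentation_level :=
          PySem.Int.floordiv (PySem.Str.len line - PySem.Str.len (PySem.Str.lstrip line)) 3
        let current_path := PySem.List.slice st.2 none (some indentation_level)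
        let item := PySem.Str.strip line
        if PySem.Str.isIn "." item then
          (st.1 ++ [PySem.Str.join "/" (current_path ++ [item])], current_path)
        else
          (st.1, current_path ++ [item])) (files, path)).1 = files ++ pvFA lines path := by
  induction lines generalizing files path with
  | nil => simp [pvFA]
  | cons line rest ih =>
    simp only [List.foldl_cons, pvFA]
    by_cases h : PySem.Str.strip line = ""
    · rw [if_pos h, if_pos h]
      exact ih files path
    · rw [if_neg h, if_neg h]
      by_cases hf : PySem.Str.isIn "." (PySem.Str.strip line) = true
      · rw [if_pos hf, if_pos hf, ih]
        simp [pvDepth]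
      · rw [if_neg hf, if_neg hf, ih]
        simp [pvDepth]

-- A's recursion over preprocessed (depth, item) entries.
def pvFE : List (Int × String) → List String → List String
  | [], _ => []
  | (d, item) :: rest, path =>
    let path' := PySem.List.slice path none (some d)
    if PySem.Str.isIn "." item then
      PySem.Str.join "/" (path' ++ [item]) :: pvFE rest path'
    else pvFE rest (path' ++ [item])

def pvProcess (lines : List String) : List (Int × String) :=
  (lines.filter (fun l => !(PySem.Str.strip l = ""))).map (fun l => (pvDepth l, PySem.Str.strip l))

lemma pvProcess_cons_empty (line : String) (rest : List String)
    (h : PySem.Str.strip line = "") : pvProcess (line :: rest) = pvProcess rest := by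
  simp [pvProcess, h]

lemma pvProcess_cons (line : String) (rest : List String)
    (h : ¬ PySem.Str.strip line = "") :
    pvProcess (line :: rest) = (pvDepth line, PySem.Str.strip line) :: pvProcess rest := by
  simp [pvProcess, h]

lemma pvFA_eq_pvFE (lines : List String) (path : List String) :
    pvFA lines path = pvFE (pvProcess lines) path := by
  induction lines generalizing path with
  | nil => simp [pvFA, pvProcess, pvFE]
  | cons line rest ih =>
    by_cases h : PySem.Str.strip line = ""
    · rw [pvProcess_cons_empty _ _ h]
      simp only [pvFA]
      rw [if_pos h]
      exact ih path
    · rw [pvProcess_cons _ _ h]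
      simp only [pvFA, pvFE]
      rw [if_neg h]
      by_cases hf : PySem.Str.isIn "." (PySem.Str.strip line) = true
      · rw [if_pos hf, if_pos hf, ih]
      · rw [if_neg hf, if_neg hf, ih]

-- B's entry list is exactly pvProcess of the lines.
lemma pvEntries_eq (tree_string : String) :
    pvEntries tree_string =
      pvProcess ((PySem.Str.split? (PySem.Str.strip tree_string) "\n").getD []) := by
  unfold pvEntries
  generalize (PySem.Str.split? (PySem.Str.strip tree_string) "\n").getD [] = lines
  suffices h : ∀ acc : List (Int × String),
      lines.foldl (fun acc line =>
        let item := PySem.Str.strip line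
        if item = "" then acc
        else acc ++ [(PySem.Int.floordiv (PySem.Str.len line - PySem.Str.len (PySem.Str.lstrip line)) 3,
                      item)]) acc = acc ++ pvProcess lines by
    simpa using h []
  induction lines with
  | nil => simp [pvProcess]
  | cons line rest ih =>
    intro acc
    simp only [List.foldl_cons]
    by_cases h : PySem.Str.strip line = ""
    · rw [if_pos h, ih, pvProcess_cons_empty _ _ h]
    · rw [if_neg h, ih, pvProcess_cons _ _ h, pvDepth]
      simp


-- Every entry pvWalk leaves unconsumed is one of the entries it was given.
lemma pvWalk_rem_mem (fuel : Nat) (es : List (Int × String)) (pfx : List String) :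
    ∀ p ∈ (pvWalk fuel es pfx).2, p ∈ es := by
  induction fuel generalizing es pfx with
  | zero => intro p hp; simpa [pvWalk] using hp
  | succ fuel ih =>
    cases es with
    | nil => intro p hp; simp [pvWalk] at hp
    | cons q rest =>
      obtain ⟨d, item⟩ := q
      intro p hp
      by_cases hlt : d < (pfx.length : Int)
      · simpa [pvWalk, hlt] using hp
      · by_cases hfile : PySem.Str.isIn "." item = true
        · simp only [pvWalk, if_neg hlt, hfile, if_true] at hp
          exact List.mem_cons_of_mem _ (ih rest pfx p hp)
        · simp only [pvWalk, if_neg hlt, hfile, if_false, Bool.false_eq_true] at hp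
          exact List.mem_cons_of_mem _
            (ih rest (pfx ++ [item]) p (ih (pvWalk fuel rest (pfx ++ [item])).2 pfx p hp))

-- The head of what pvWalk leaves unconsumed is strictly shallower than the prefix.
-- Main invariant: with enough fuel, pvFE es pfx = emitted ++ pvFE remaining pfx,
-- the remaining entries are no longer than es, and their head is shallower than pfx.
lemma pvWalk_spec (fuel : Nat) (es : List (Int × String)) (pfx : List String)
    (hfuel : es.length ≤ fuel) (hd : ∀ p ∈ es, 0 ≤ p.1) :
    pvFE es pfx = (pvWalk fuel es pfx).1 ++ pvFE (pvWalk fuel es pfx).2 pfx ∧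
    (pvWalk fuel es pfx).2.length ≤ es.length ∧
    (∀ d item rest, (pvWalk fuel es pfx).2 = (d, item) :: rest → d < (pfx.length : Int)) := by
  induction fuel generalizing es pfx with
  | zero =>
    have : es = [] := by
      cases es with
      | nil => rfl
      | cons a t => simp at hfuel
    subst this
    refine ⟨by simp [pvWalk, pvFE], by simp [pvWalk], ?_⟩
    intro d item rest h
    simp [pvWalk] at h
  | succ fuel ih =>
    cases es with
    | nil =>
      refine ⟨by simp [pvWalk, pvFE], by simp [pvWalk], ?_⟩
      intro d item rest h; simp [pvWalk] at h
    | cons p rest =>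
      obtain ⟨d, item⟩ := p
      have hd0 : 0 ≤ d := hd (d, item) (by simp)
      have hdrest : ∀ p ∈ rest, 0 ≤ p.1 := fun p hp => hd p (by simp [hp])
      have hfr : rest.length ≤ fuel := by simpa using hfuel
      by_cases hlt : d < (pfx.length : Int)
      · refine ⟨by simp [pvWalk, hlt], by simp [pvWalk, hlt], ?_⟩
        intro d' item' rest' h
        simp only [pvWalk, if_pos hlt] at h
        injection h with h1 h2
        injection h1 with h3 h4
        subst h3; exact hlt
      · -- depth ≥ len pfx: slice leaves pfx unchanged
        have hslice : PySem.List.slice pfx none (some d) = pfx := by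
          rw [PySem.List.slice_to pfx hd0]
          exact List.take_of_length_le (by omega)
        by_cases hfile : PySem.Str.isIn "." item = true
        · -- file line
          obtain ⟨ih1, ih2, ih3⟩ := ih rest pfx hfr hdrest
          refine ⟨?_, ?_, ?_⟩
          · simp only [pvWalk, if_neg hlt, hfile, if_true, pvFE, hslice]
            simp [ih1]
          · simp only [pvWalk, if_neg hlt, hfile, if_true]
            simp only [List.length_cons]
            omega
          · intro d' item' rest' h
            simp only [pvWalk, if_neg hlt, hfile, if_true] at h
            exact ih3 d' item' rest' h
        · -- directory line: recurse deeper, then continue at this level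
          obtain ⟨ih1, ih2, ih3⟩ := ih rest (pfx ++ [item]) hfr hdrest
          have hrem : ∀ p ∈ (pvWalk fuel rest (pfx ++ [item])).2, 0 ≤ p.1 := by
            intro p hp
            -- remaining entries are entries of rest?  prove via a membership lemma: instead,
            -- derive from ih2 and a suffix fact; easier: separate lemma below
            exact hdrest p (pvWalk_rem_mem fuel rest (pfx ++ [item]) p hp)
          obtain ⟨jh1, jh2, jh3⟩ := ih (pvWalk fuel rest (pfx ++ [item])).2 pfx (by omega) hrem
          refine ⟨?_, ?_, ?_⟩
          · simp only [pvWalk, if_neg hlt, hfile, if_false, Bool.false_eq_true, pvFE, hslice]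
            -- pvFE rest (pfx ++ [item]) = inner ++ pvFE rem (pfx ++ [item])
            -- and pvFE rem (pfx ++ [item]) = pvFE rem pfx since rem's head depth ≤ len pfx
            have hswap : pvFE (pvWalk fuel rest (pfx ++ [item])).2 (pfx ++ [item]) =
                pvFE (pvWalk fuel rest (pfx ++ [item])).2 pfx := by
              cases hrm : (pvWalk fuel rest (pfx ++ [item])).2 with
              | nil => simp [pvFE]
              | cons q t =>
                obtain ⟨d', item'⟩ := q
                have hd'lt : d' < ((pfx ++ [item]).length : Int) := ih3 d' item' t hrm
                have hd'0 : 0 ≤ d' := hrem (d', item') (by simp [hrm])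
                have hle : d' ≤ (pfx.length : Int) := by simp at hd'lt; omega
                have : PySem.List.slice (pfx ++ [item]) none (some d') =
                    PySem.List.slice pfx none (some d') := by
                  rw [PySem.List.slice_to _ hd'0, PySem.List.slice_to pfx hd'0,
                    List.take_append_of_le_length (by omega)]
                simp only [pvFE, this]
            rw [ih1, hswap, jh1]
            simp
          · simp only [pvWalk, if_neg hlt, hfile, if_false, Bool.false_eq_true]
            simp only [List.length_cons]
            omega
          · intro d' item' rest' h
            simp only [pvWalk, if_neg hlt, hfile, if_false, Bool.false_eq_true] at h
            exact jh3 d' item' rest' h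

-- ===== VERDICT (by name: the statement is the Claim_ definition above) =====
theorem parse_tree_to_files_array_spec : Claim_equal_parse_tree_to_files_array := by
  intro s _hdom
  unfold Spec_parse_tree_to_files_array parse_tree_to_files_array parse_tree_to_files_array_alt
  simp only []
  rw [foldl_eq_pvFA, pvFA_eq_pvFE, ← pvEntries_eq]
  have hd : ∀ p ∈ pvEntries s, 0 ≤ p.1 := by
    intro p hp
    rw [pvEntries_eq] at hp
    unfold pvProcess at hp
    simp only [List.mem_map] at hp
    obtain ⟨l, _, rfl⟩ := hp
    exact pvDepth_nonneg l
  obtain ⟨h1, _, h3⟩ := pvWalk_spec (pvEntries s).length (pvEntries s) [] le_rfl hd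
  rw [h1]
  cases hrm : (pvWalk (pvEntries s).length (pvEntries s) []).2 with
  | nil => simp [pvFE]
  | cons q t =>
    obtain ⟨d, item⟩ := q
    have := h3 d item t hrm
    have h0 : 0 ≤ d := hd (d, item) (pvWalk_rem_mem _ _ _ _ (hrm ▸ List.mem_cons_self))
    simp at this
    omega
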